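-- pv_equiv track=rewrite | github.com/B-T-D/DCS_work_backup | CH10_self_similarity_and_recursion/exercises_10_2/_12_license_plates.py | license_plates
-- ===== SOURCE A (Python) =====
-- def license_plates(length, letters, numbers):
--     """Returns a list of strings representing all possible license plates of
--     the form 'ABC 123' (for length=3).
--
--     Args:
--         length (int): number of characters in each of letters and numbers
--         letters (str): string containing all the possible letters that can
--             be used on the plates
--         numbers (str): string containing all digit characters that can be
--             used on the plates
--     """
-- ##    assert length == len(letters) == len(numbers), f"{length} != {len(letters)} != {len(numbers)}"
--
--     if length == 0:
--         return [' ']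
--
--     shorter = license_plates(length - 1, letters, numbers)
--
--     plates_list = []
--     for letter in letters:
--         for number in numbers:
--             for plate in shorter:
--                 plates_list.append(letter + plate + number)
--
--     return plates_list
-- ===== SOURCE B (Python) =====
-- def license_plates(length, letters, numbers):
--     """Iterative bottom-up version: repeat the wrapping step `length` times."""
--     result = [' ']
--     for _ in range(length):
--         result = [letter + plate + number
--                   for letter in letters
--                   for number in numbers
--                   for plate in result]
--     return result
-- ===== Notes on version B (the rewrite author's own statement) =====
-- stated objective: alternative
-- what changed: Replaced the top-down recursion with a bottom-up iterative loop that rebuilds the list length times with one comprehension.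
import Mathlib
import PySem

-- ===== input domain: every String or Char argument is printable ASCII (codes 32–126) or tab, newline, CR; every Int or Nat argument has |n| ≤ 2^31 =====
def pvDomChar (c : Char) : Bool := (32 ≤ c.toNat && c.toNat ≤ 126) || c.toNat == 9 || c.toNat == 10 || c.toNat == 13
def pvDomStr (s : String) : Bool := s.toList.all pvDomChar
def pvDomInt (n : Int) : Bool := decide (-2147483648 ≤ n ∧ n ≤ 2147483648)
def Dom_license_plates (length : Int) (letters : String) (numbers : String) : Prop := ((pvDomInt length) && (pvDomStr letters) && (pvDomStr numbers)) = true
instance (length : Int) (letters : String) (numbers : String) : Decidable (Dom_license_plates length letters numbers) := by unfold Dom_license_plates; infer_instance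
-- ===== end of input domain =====

-- B replaces A's top-down recursion by a bottom-up iterative loop (alternative decomposition, same cost).

-- ===== PORT A =====
-- A's recursion on `length`: the Int argument recurses as a Nat (Python recurses on
-- length-1 down to 0; for negative length Python never terminates — excluded by Pre_).
def lpGo (letters numbers : String) : Nat → List String
  | 0 => [" "]
  | n + 1 =>
    -- shorter = license_plates(length-1, ...); then the three nested append loops
    let shorter := lpGo letters numbers n
    letters.toList.foldl (fun acc letter =>
      numbers.toList.foldl (fun acc2 number =>
        shorter.foldl (fun acc3 plate =>
          acc3 ++ [String.singleton letter ++ plate ++ String.singleton number]) acc2) acc) []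

def license_plates (length : Int) (letters : String) (numbers : String) : List String :=
  lpGo letters numbers length.toNat

-- ===== PORT B =====
-- one iteration of B's comprehension: letter outer, number middle, current list inner
def lpStepAlt (letters numbers : String) (result : List String) : List String :=
  letters.toList.flatMap (fun letter =>
    numbers.toList.flatMap (fun number =>
      result.map (fun plate => String.singleton letter ++ plate ++ String.singleton number)))

def license_plates_alt (length : Int) (letters : String) (numbers : String) : List String :=
  (PySem.List.pyRange 0 length 1).foldl (fun result _ => lpStepAlt letters numbers result) [" "]

-- ===== PRECONDITION & SPEC =====
-- Pre_ excludes negative length, on which A's recursion never reaches 0 (RecursionError).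
def Pre_license_plates (length : Int) (letters : String) (numbers : String) : Prop := 0 ≤ length
instance (length : Int) (letters : String) (numbers : String) : Decidable (Pre_license_plates length letters numbers) := by unfold Pre_license_plates; infer_instance
def pvWitness_license_plates : Int × String × String := (2, "ab", "12")

def Spec_license_plates (length : Int) (letters : String) (numbers : String) (out : List String) : Prop := out = license_plates_alt length letters numbers
instance (length : Int) (letters : String) (numbers : String) (out : List String) : Decidable (Spec_license_plates length letters numbers out) := by unfold Spec_license_plates; infer_instance

-- ===== CLAIM (what is proved, stated in full; the proofs are below) =====
def Claim_equal_license_plates : Prop := ∀ (length : Int) (letters : String) (numbers : String), Dom_license_plates length letters numbers → Pre_license_plates length letters numbers → Spec_license_plates length letters numbers (license_plates length letters numbers)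

-- ===== LEMMAS AND PROOFS =====

-- A's three nested append-loops compute B's comprehension (flatMap nest)
theorem lpStep_eq (letters numbers : String) (shorter : List String) :
    letters.toList.foldl (fun acc letter =>
      numbers.toList.foldl (fun acc2 number =>
        shorter.foldl (fun acc3 plate =>
          acc3 ++ [String.singleton letter ++ plate ++ String.singleton number]) acc2) acc) []
    = lpStepAlt letters numbers shorter := by
  unfold lpStepAlt
  have hinner : ∀ (letter number : Char) (acc3 : List String),
      shorter.foldl (fun acc3 plate =>
        acc3 ++ [String.singleton letter ++ plate ++ String.singleton number]) acc3
      = acc3 ++ shorter.map (fun plate => String.singleton letter ++ plate ++ String.singleton number) := by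
    intro letter number acc3
    induction shorter generalizing acc3 with
    | nil => simp
    | cons p ps ih => rw [List.foldl_cons, ih]; simp
  have hmid : ∀ (letter : Char) (acc2 : List String),
      numbers.toList.foldl (fun acc2 number =>
        shorter.foldl (fun acc3 plate =>
          acc3 ++ [String.singleton letter ++ plate ++ String.singleton number]) acc2) acc2
      = acc2 ++ numbers.toList.flatMap (fun number =>
          shorter.map (fun plate => String.singleton letter ++ plate ++ String.singleton number)) := by
    intro letter acc2
    induction numbers.toList generalizing acc2 with
    | nil => simp
    | cons d ds ih => rw [List.foldl_cons, hinner, ih]; simp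
  have houter : ∀ (acc : List String),
      letters.toList.foldl (fun acc letter =>
        numbers.toList.foldl (fun acc2 number =>
          shorter.foldl (fun acc3 plate =>
            acc3 ++ [String.singleton letter ++ plate ++ String.singleton number]) acc2) acc) acc
      = acc ++ letters.toList.flatMap (fun letter =>
          numbers.toList.flatMap (fun number =>
            shorter.map (fun plate => String.singleton letter ++ plate ++ String.singleton number))) := by
    intro acc
    induction letters.toList generalizing acc with
    | nil => simp
    | cons c cs ih => rw [List.foldl_cons, hmid, ih]; simp
  simpa using houter []

theorem foldl_const_step {α β : Type} (f : α → α) :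
    ∀ (l : List β) (s : α), l.foldl (fun r _ => f r) s = f^[l.length] s := by
  intro l
  induction l with
  | nil => intro s; simp
  | cons x xs ih => intro s; simp [List.foldl, ih, Function.iterate_succ_apply]

theorem lpGo_eq_iterate (letters numbers : String) :
    ∀ n : Nat, lpGo letters numbers n = (lpStepAlt letters numbers)^[n] [" "] := by
  intro n
  induction n with
  | zero => simp [lpGo]
  | succ m ih =>
    rw [Function.iterate_succ_apply', ← ih]
    show (letters.toList.foldl _ []) = _
    rw [lpStep_eq]

-- ===== VERDICT (by name: the statement is the Claim_ definition above) =====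
theorem license_plates_spec : Claim_equal_license_plates := by
  intro length letters numbers _ hpre
  unfold Spec_license_plates license_plates license_plates_alt
  rw [foldl_const_step (lpStepAlt letters numbers), lpGo_eq_iterate]
  congr 1
  have := PySem.List.length_pyRange_one 0 length
  omega
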